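-- pv_equiv track=rewrite | github.com/SkShizan/Scrapper | scrapers/duckduckgo.py | _get_best_email
-- ===== SOURCE A (Python) =====
-- def _get_best_email(email_list, website_domain):
--     if not email_list: return None
--     clean_domain = website_domain.lower()
--     if clean_domain.startswith('www.'):
--         clean_domain = clean_domain[4:]
--
--     for email in email_list:
--         if clean_domain in email.lower():
--             return email
--     for email in email_list:
--         if email.lower().startswith(('info', 'contact', 'admin', 'support', 'hello', 'office')):
--             return email
--     return list(email_list)[0]
-- ===== SOURCE B (Python) =====
-- def _get_best_email(email_list, website_domain):
--     if not email_list: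
--         return None
--     clean_domain = website_domain.lower()
--     if clean_domain.startswith('www.'):
--         clean_domain = clean_domain[4:]
--
--     def rank(email):
--         low = email.lower()
--         if clean_domain in low:
--             return 0
--         if low.startswith(('info', 'contact', 'admin', 'support', 'hello', 'office')):
--             return 1
--         return 2
--
--     return min(email_list, key=rank)
-- ===== Notes on version B (the rewrite author's own statement) =====
-- stated objective: alternative
-- what changed: Replaces A's staged scans (domain pass, then prefix pass, then first element) with a scoring function ranking each email 0/1/2 and a single stable min-by-rank selection.
import Mathlib
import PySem

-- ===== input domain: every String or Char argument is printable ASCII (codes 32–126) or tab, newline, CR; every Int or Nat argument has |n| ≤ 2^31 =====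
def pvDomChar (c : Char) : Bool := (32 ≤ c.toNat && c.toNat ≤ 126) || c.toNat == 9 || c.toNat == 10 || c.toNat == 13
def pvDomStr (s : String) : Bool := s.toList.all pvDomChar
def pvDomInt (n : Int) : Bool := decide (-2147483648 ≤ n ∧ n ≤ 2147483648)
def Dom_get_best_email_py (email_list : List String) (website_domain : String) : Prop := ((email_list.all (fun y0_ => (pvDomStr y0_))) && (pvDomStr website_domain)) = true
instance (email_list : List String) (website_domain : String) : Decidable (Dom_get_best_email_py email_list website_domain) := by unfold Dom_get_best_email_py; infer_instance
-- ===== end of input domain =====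

-- B replaces A's staged scans with a 0/1/2 scoring function and a stable min-by-rank selection; same result.

-- clean_domain = website_domain.lower(); strip leading 'www.' (identical in both Pythons)
def pvCleanDomain (website_domain : String) : String :=
  let c := PySem.Str.lower website_domain
  if PySem.Str.startswith c "www." then PySem.Str.slice c (some 4) none else c

-- ===== PORT A =====
-- email.lower().startswith(('info','contact','admin','support','hello','office'))
def pvPrefTest (e : String) : Bool :=
  (["info", "contact", "admin", "support", "hello", "office"] : List String).any
    (fun p => PySem.Str.startswith (PySem.Str.lower e) p)

-- first loop: first email whose lowercase contains clean_domain
def pvScanDomain (clean : String) : List String → Option String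
  | [] => none
  | e :: rest => if PySem.Str.isIn clean (PySem.Str.lower e) then some e else pvScanDomain clean rest

-- second loop: first email passing the prefix test
def pvScanPref : List String → Option String
  | [] => none
  | e :: rest => if pvPrefTest e then some e else pvScanPref rest

def get_best_email_py (email_list : List String) (website_domain : String) : Option String :=
  match email_list with
  | [] => none
  | h :: t =>
    let clean := pvCleanDomain website_domain
    match pvScanDomain clean (h :: t) with
    | some e => some e
    | none =>
      match pvScanPref (h :: t) with
      | some e => some e
      | none => some h   -- list(email_list)[0]

-- ===== PORT B =====
-- rank(email): 0 domain match, 1 priority prefix, 2 otherwise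
def pvRank (clean e : String) : Nat :=
  if PySem.Str.isIn clean (PySem.Str.lower e) then 0
  else if (["info", "contact", "admin", "support", "hello", "office"] : List String).any
            (fun p => PySem.Str.startswith (PySem.Str.lower e) p) then 1
  else 2

-- min(email_list, key=rank): CPython's min keeps the earlier element on ties (strict '<' to replace)
def pvMinByRank (clean : String) (acc : String) : List String → String
  | [] => acc
  | e :: rest => pvMinByRank clean (if pvRank clean e < pvRank clean acc then e else acc) rest

def get_best_email_py_alt (email_list : List String) (website_domain : String) : Option String :=
  match email_list with
  | [] => none
  | h :: t => some (pvMinByRank (pvCleanDomain website_domain) h t)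

-- ===== PRECONDITION & SPEC =====
def Spec_get_best_email_py (email_list : List String) (website_domain : String) (out : Option String) : Prop := out = get_best_email_py_alt email_list website_domain
instance (email_list : List String) (website_domain : String) (out : Option String) : Decidable (Spec_get_best_email_py email_list website_domain out) := by unfold Spec_get_best_email_py; infer_instance

-- ===== CLAIM (what is proved, stated in full; the proofs are below) =====
def Claim_equal_get_best_email_py : Prop := ∀ (email_list : List String) (website_domain : String), Dom_get_best_email_py email_list website_domain → Spec_get_best_email_py email_list website_domain (get_best_email_py email_list website_domain)

-- ===== LEMMAS AND PROOFS =====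

set_option maxHeartbeats 1000000 in
lemma pvMinByRank_char (clean : String) (l : List String) : ∀ acc : String,
    pvMinByRank clean acc l =
      if pvRank clean acc = 0 then acc
      else match pvScanDomain clean l with
        | some e => e
        | none =>
          if pvRank clean acc = 1 then acc
          else match pvScanPref l with
            | some e => e
            | none => acc := by
  induction l with
  | nil =>
    intro acc
    simp only [pvMinByRank, pvScanDomain, pvScanPref]
    split_ifs <;> rfl
  | cons e rest ih =>
    intro acc
    rw [show pvMinByRank clean acc (e :: rest) =
          pvMinByRank clean (if pvRank clean e < pvRank clean acc then e else acc) rest from rfl,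
        ih]
    simp only [pvScanDomain, pvScanPref]
    unfold pvRank pvPrefTest
    split_ifs <;> first | rfl | omega | simp_all

-- ===== VERDICT (by name: the statement is the Claim_ definition above) =====
theorem get_best_email_py_spec : Claim_equal_get_best_email_py := by
  intro email_list website_domain _
  unfold Spec_get_best_email_py
  cases email_list with
  | nil => rfl
  | cons h t =>
    simp only [get_best_email_py, get_best_email_py_alt, pvMinByRank_char, pvScanDomain,
      pvScanPref]
    cases hD : pvScanDomain (pvCleanDomain website_domain) t <;>
      cases hP : pvScanPref t <;>
        (unfold pvRank pvPrefTest; split_ifs <;> simp_all)
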